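-- pv_equiv track=rewrite | github.com/JorgeFdezPerez/spinners | container-interfaz/configuration/interfaz/interfaz/interfaz.py | agrupar_por_modulo
-- ===== SOURCE A (Python) =====
-- def agrupar_por_modulo(direcciones: list[str], estados: list[bool]) -> dict[str, list[tuple[str, bool]]]:
--     modulos = {
--         "ME_BASES_": [],
--         "ME_SPINNERS_": [],
--         "ME_TRANSPORTE_": []
--     }
--     for nombre, estado in zip(direcciones, estados):
--         for prefijo in modulos:
--             if nombre.startswith(prefijo):
--                 limpio = nombre[len(prefijo):]
--                 modulos[prefijo].append((limpio, estado))
--                 break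
--     return modulos
-- ===== SOURCE B (Python) =====
-- def agrupar_por_modulo(direcciones: list[str], estados: list[bool]) -> dict[str, list[tuple[str, bool]]]:
--     modulos = {
--         "ME_BASES_": [],
--         "ME_SPINNERS_": [],
--         "ME_TRANSPORTE_": []
--     }
--     for nombre, estado in zip(direcciones, estados):
--         if nombre.startswith("ME_"):
--             fin = nombre.find("_", 3)
--             if fin != -1:
--                 grupo = modulos.get(nombre[:fin + 1])
--                 if grupo is not None:
--                     grupo.append((nombre[fin + 1:], estado))
--     return modulos
-- ===== Notes on version B (the rewrite author's own statement) =====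
-- stated objective: alternative
-- what changed: Instead of testing each name against every prefix (inner loop over the dict with break), B parses the candidate key directly out of the name - all keys have the shape 'ME_<WORD>_', so it locates the '_' after position 3, slices the key and does a single dict lookup; correct because a name starts with one of the keys exactly when the parsed key equals it.
import Mathlib
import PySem

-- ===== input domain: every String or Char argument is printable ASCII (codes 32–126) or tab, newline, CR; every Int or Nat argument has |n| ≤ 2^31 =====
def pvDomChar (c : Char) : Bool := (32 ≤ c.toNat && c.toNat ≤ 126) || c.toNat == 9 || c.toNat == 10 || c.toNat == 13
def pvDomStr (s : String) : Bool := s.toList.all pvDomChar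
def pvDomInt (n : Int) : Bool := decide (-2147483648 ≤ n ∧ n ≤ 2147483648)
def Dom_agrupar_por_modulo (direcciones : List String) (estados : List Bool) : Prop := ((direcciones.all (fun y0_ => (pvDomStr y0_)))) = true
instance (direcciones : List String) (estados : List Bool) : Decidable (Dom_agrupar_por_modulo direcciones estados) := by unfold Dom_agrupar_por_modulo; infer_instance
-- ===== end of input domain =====

-- B replaces A's try-every-prefix dispatch (inner loop over the dict keys with break) by parsing
-- the candidate key out of the name (find the '_' after position 3, slice, one dict lookup);
-- objective: alternative.

-- ===== PORT A =====
-- inner 'for prefijo in modulos: if nombre.startswith(prefijo): …; break'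
def pvInnerFor (nombre : String) (estado : Bool) :
    List String → PySem.Dict String (List (String × Bool)) → PySem.Dict String (List (String × Bool))
  | [], modulos => modulos
  | prefijo :: rest, modulos =>
    if PySem.Str.startswith nombre prefijo then
      -- limpio = nombre[len(prefijo):]; modulos[prefijo].append((limpio, estado)); break
      modulos.modify prefijo []
        (fun l => l ++ [(PySem.Str.slice nombre (some (PySem.Str.len prefijo)) none, estado)])
    else pvInnerFor nombre estado rest modulos

def agrupar_por_modulo (direcciones : List String) (estados : List Bool) :
    List (String × List (String × Bool)) :=
  ((direcciones.zip estados).foldl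
    (fun modulos ne => pvInnerFor ne.1 ne.2 modulos.keys modulos)
    (PySem.Dict.ofList [("ME_BASES_", []), ("ME_SPINNERS_", []), ("ME_TRANSPORTE_", [])])).items

-- ===== PORT B =====
-- body of B's loop: parse the candidate key out of the name, one dict lookup
def pvStepB (modulos : PySem.Dict String (List (String × Bool))) (ne : String × Bool) :
    PySem.Dict String (List (String × Bool)) :=
  if PySem.Str.startswith ne.1 "ME_" then
    let fin := PySem.Str.findFrom ne.1 "_" 3 none
    if fin ≠ -1 then
      let clave := PySem.Str.slice ne.1 none (some (fin + 1))
      match modulos.get? clave with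
      | some grupo =>
          modulos.insert clave (grupo ++ [(PySem.Str.slice ne.1 (some (fin + 1)) none, ne.2)])
      | none => modulos
    else modulos
  else modulos

def agrupar_por_modulo_alt (direcciones : List String) (estados : List Bool) :
    List (String × List (String × Bool)) :=
  ((direcciones.zip estados).foldl pvStepB
    (PySem.Dict.ofList [("ME_BASES_", []), ("ME_SPINNERS_", []), ("ME_TRANSPORTE_", [])])).items

-- ===== PRECONDITION & SPEC =====
def Spec_agrupar_por_modulo (direcciones : List String) (estados : List Bool) (out : List (String × List (String × Bool))) : Prop := out = agrupar_por_modulo_alt direcciones estados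
instance (direcciones : List String) (estados : List Bool) (out : List (String × List (String × Bool))) : Decidable (Spec_agrupar_por_modulo direcciones estados out) := by unfold Spec_agrupar_por_modulo; infer_instance

-- ===== CLAIM (what is proved, stated in full; the proofs are below) =====
def Claim_equal_agrupar_por_modulo : Prop := ∀ (direcciones : List String) (estados : List Bool), Dom_agrupar_por_modulo direcciones estados → Spec_agrupar_por_modulo direcciones estados (agrupar_por_modulo direcciones estados)

-- ===== LEMMAS AND PROOFS =====

-- the common closed form: the group of prefix p, one filtering scan
def pvGroup (p : String) (l : List (String × Bool)) : List (String × Bool) :=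
  l.filterMap (fun ne =>
    if PySem.Str.startswith ne.1 p then
      some (PySem.Str.slice ne.1 (some (PySem.Str.len p)) none, ne.2)
    else none)

-- no string starts with two different of the three prefixes (they are mutually non-prefix)
lemma pv_excl {p q : String} (s : String)
    (hpq : ¬ (p.toList <+: q.toList) ∧ ¬ (q.toList <+: p.toList))
    (h1 : PySem.Str.startswith s p = true) : PySem.Str.startswith s q = false := by
  by_contra h
  rw [Bool.not_eq_false] at h
  simp only [PySem.Str.startswith_eq, PySem.Chars.startswith_iff] at h1 h
  rcases List.prefix_or_prefix_of_prefix h1 h with hc | hc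
  · exact hpq.1 hc
  · exact hpq.2 hc

-- A's loop invariant
lemma pv_inv (l : List (String × Bool)) (a b c : List (String × Bool)) :
    (l.foldl (fun modulos ne => pvInnerFor ne.1 ne.2 modulos.keys modulos)
      (PySem.Dict.mk [("ME_BASES_", a), ("ME_SPINNERS_", b), ("ME_TRANSPORTE_", c)])).items
    = [("ME_BASES_", a ++ pvGroup "ME_BASES_" l),
       ("ME_SPINNERS_", b ++ pvGroup "ME_SPINNERS_" l),
       ("ME_TRANSPORTE_", c ++ pvGroup "ME_TRANSPORTE_" l)] := by
  induction l generalizing a b c with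
  | nil => simp [pvGroup]
  | cons ne l ih =>
    simp only [List.foldl_cons, PySem.Dict.keys_mk, List.map]
    by_cases h1 : PySem.Str.startswith ne.1 "ME_BASES_" = true
    · have h2 := pv_excl (p := "ME_BASES_") (q := "ME_SPINNERS_") ne.1 (by decide) h1
      have h3 := pv_excl (p := "ME_BASES_") (q := "ME_TRANSPORTE_") ne.1 (by decide) h1
      simp at h1 h2 h3
      simp [pvInnerFor, h1, h2, h3, PySem.Dict.modify, PySem.Dict.insert, PySem.Dict.getD,
            PySem.Dict.get?, PySem.Dict.contains, pvGroup, ih]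
    · by_cases h2 : PySem.Str.startswith ne.1 "ME_SPINNERS_" = true
      · have h3 := pv_excl (p := "ME_SPINNERS_") (q := "ME_TRANSPORTE_") ne.1 (by decide) h2
        simp at h1 h2 h3
        simp [pvInnerFor, h1, h2, h3, PySem.Dict.modify, PySem.Dict.insert, PySem.Dict.getD,
              PySem.Dict.get?, PySem.Dict.contains, pvGroup, ih]
      · by_cases h3 : PySem.Str.startswith ne.1 "ME_TRANSPORTE_" = true
        · simp at h1 h2 h3
          simp [pvInnerFor, h1, h2, h3, PySem.Dict.modify, PySem.Dict.insert, PySem.Dict.getD,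
                PySem.Dict.get?, PySem.Dict.contains, pvGroup, ih]
        · simp at h1 h2 h3
          simp [pvInnerFor, h1, h2, h3, pvGroup, ih]

-- first occurrence of x in pre ++ x :: t, x not in pre, is at index pre.length
lemma pv_find_single (pre t : List Char) (x : Char) (hx : x ∉ pre) :
    PySem.Chars.find (pre ++ x :: t) [x] = (pre.length : Int) := by
  have hin : [x] <:+: (pre ++ x :: t) := ⟨pre, t, by simp⟩
  have h0 : 0 ≤ PySem.Chars.find (pre ++ x :: t) [x] :=
    (PySem.Chars.find_nonneg_iff _ _).2 hin
  obtain ⟨h1, h2⟩ := PySem.Chars.find_spec h0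
  set n := (PySem.Chars.find (pre ++ x :: t) [x]).toNat with hn
  have hle : n ≤ pre.length := by
    by_contra hlt
    exact h2 pre.length (by omega) (by simp)
  have heq : n = pre.length := by
    rcases lt_or_eq_of_le hle with hlt | h
    · exfalso
      have hpd : pre.drop n = pre[n] :: pre.drop (n + 1) := List.drop_eq_getElem_cons hlt
      have hd : (pre ++ x :: t).drop n = pre[n] :: (pre.drop (n + 1) ++ x :: t) := by
        rw [List.drop_append_of_le_length (le_of_lt hlt), hpd, List.cons_append]
      rw [hd] at h1
      have hx' : x = pre[n] := by
        rcases h1 with ⟨r, hr⟩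
        simpa using congrArg (·.head?) hr
      exact hx (hx' ▸ List.getElem_mem _)
    · exact h
  omega

-- parsing a name of the shape ME_<mid>_<t> ('_' not in mid): the computed key and tail
lemma pv_parse (s : String) (mid t : List Char) (hmid : '_' ∉ mid)
    (hs : s.toList = 'M' :: 'E' :: '_' :: (mid ++ '_' :: t)) :
    PySem.Str.startswith s "ME_" = true ∧
    PySem.Str.findFrom s "_" 3 none = (3 + mid.length : Int) ∧
    PySem.Str.slice s none (some ((3 + mid.length : Int) + 1))
      = String.ofList ('M' :: 'E' :: '_' :: (mid ++ ['_'])) ∧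
    PySem.Str.slice s (some ((3 + mid.length : Int) + 1)) none = String.ofList t := by
  have hlen : 3 ≤ s.toList.length := by simp [hs]
  have hdrop : s.toList.drop 3 = mid ++ '_' :: t := by simp [hs]
  have hfind : PySem.Chars.find (s.toList.drop 3) ['_'] = (mid.length : Int) := by
    rw [hdrop]; exact pv_find_single mid t '_' hmid
  refine ⟨?_, ?_, ?_, ?_⟩
  · rw [PySem.Str.startswith_eq]
    rw [PySem.Chars.startswith_iff]
    exact ⟨mid ++ '_' :: t, by simp [hs]⟩
  · rw [PySem.Str.findFrom_eq]
    have h3 : (3 : Int) = ((3 : Nat) : Int) := rfl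
    rw [h3, PySem.Chars.findFrom_natCast s.toList "_".toList 3 hlen]
    have : "_".toList = ['_'] := rfl
    rw [this, hfind]
    simp
  · have hb : (0 : Int) ≤ (3 + mid.length : Int) + 1 := by positivity
    apply String.toList_injective
    rw [show PySem.Str.slice s none (some ((3 + mid.length : Int) + 1))
        = String.ofList (PySem.List.slice s.toList none (some ((3 + mid.length : Int) + 1))) from rfl]
    rw [String.toList_ofList, String.toList_ofList, PySem.List.slice_to _ hb]
    have hN : ((3 + mid.length : Int) + 1).toNat = mid.length + 4 := by omega
    rw [hN, hs]
    rw [show ('M' :: 'E' :: '_' :: (mid ++ '_' :: t)).take (mid.length + 4)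
        = 'M' :: 'E' :: '_' :: ((mid ++ '_' :: t).take (mid.length + 1)) by simp [List.take_succ_cons]]
    rw [List.take_append]
    simp
  · have hb : (0 : Int) ≤ (3 + mid.length : Int) + 1 := by positivity
    apply String.toList_injective
    rw [show PySem.Str.slice s (some ((3 + mid.length : Int) + 1)) none
        = String.ofList (PySem.List.slice s.toList (some ((3 + mid.length : Int) + 1)) none) from rfl]
    rw [String.toList_ofList, String.toList_ofList, PySem.List.slice_from _ hb]
    have hN : ((3 + mid.length : Int) + 1).toNat = mid.length + 4 := by omega
    rw [hN, hs]
    rw [show ('M' :: 'E' :: '_' :: (mid ++ '_' :: t)).drop (mid.length + 4)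
        = (mid ++ '_' :: t).drop (mid.length + 1) by simp [List.drop_succ_cons]]
    rw [List.drop_append]
    simp

-- if none of the three keys is a prefix of the name, B's step leaves the dict unchanged
lemma pv_stepB_none (s : String) (e : Bool) (d : PySem.Dict String (List (String × Bool)))
    (hd : d.items.map Prod.fst = ["ME_BASES_", "ME_SPINNERS_", "ME_TRANSPORTE_"])
    (h1 : PySem.Str.startswith s "ME_BASES_" = false)
    (h2 : PySem.Str.startswith s "ME_SPINNERS_" = false)
    (h3 : PySem.Str.startswith s "ME_TRANSPORTE_" = false) :
    pvStepB d (s, e) = d := by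
  unfold pvStepB
  by_cases hsw : PySem.Str.startswith s "ME_" = true
  · simp only [hsw, if_true]
    set f := PySem.Str.findFrom s "_" 3 none with hf
    by_cases hne : f ≠ -1
    · have hlen : 3 ≤ s.toList.length := by
        rw [PySem.Str.startswith_eq, PySem.Chars.startswith_iff] at hsw
        have := hsw.length_le
        simpa using this
      have h0 : (3 : Int) ≤ f := by
        have h3 : (3 : Int) = ((3 : Nat) : Int) := rfl
        rw [hf, PySem.Str.findFrom_eq, h3] at hne ⊢
        exact (PySem.Chars.findFrom_natCast_spec s.toList "_".toList 3 hlen hne).1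
      have hpref : (PySem.Str.slice s none (some (f + 1))).toList <+: s.toList := by
        rw [show PySem.Str.slice s none (some (f + 1))
            = String.ofList (PySem.List.slice s.toList none (some (f + 1))) from rfl]
        rw [String.toList_ofList, PySem.List.slice_to _ (by omega)]
        exact List.take_prefix _ _
      have hkey : ∀ k : String, PySem.Str.startswith s k = false →
          (k == PySem.Str.slice s none (some (f + 1))) = false := by
        intro k hk
        rw [beq_eq_false_iff_ne]
        intro hkeq
        rw [PySem.Str.startswith_eq] at hk
        have : PySem.Chars.startswith s.toList k.toList = true := by
          rw [PySem.Chars.startswith_iff]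
          rw [hkeq]
          exact hpref
        rw [hk] at this
        exact Bool.false_ne_true this
      have hget : d.get? (PySem.Str.slice s none (some (f + 1))) = none := by
        unfold PySem.Dict.get?
        rw [List.find?_eq_none.2]
        · rfl
        · intro p hp
          have hp1 : p.1 ∈ d.items.map Prod.fst := List.mem_map_of_mem hp
          rw [hd] at hp1
          simp only [List.mem_cons] at hp1
          rcases hp1 with h | h | h | h
          · rw [h]; simp [hkey _ h1]
          · rw [h]; simp [hkey _ h2]
          · rw [h]; simp [hkey _ h3]
          · exact absurd h (List.not_mem_nil)
      simp [hget]
    · rw [if_neg hne]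
  · rw [Bool.not_eq_true, PySem.Str.startswith_eq,
      show ("ME_" : String).toList = ['M','E','_'] from by decide] at hsw
    simp [hsw]

-- B's loop invariant: same closed form as A's
lemma pv_inv_alt (l : List (String × Bool)) (a b c : List (String × Bool)) :
    (l.foldl pvStepB
      (PySem.Dict.mk [("ME_BASES_", a), ("ME_SPINNERS_", b), ("ME_TRANSPORTE_", c)])).items
    = [("ME_BASES_", a ++ pvGroup "ME_BASES_" l),
       ("ME_SPINNERS_", b ++ pvGroup "ME_SPINNERS_" l),
       ("ME_TRANSPORTE_", c ++ pvGroup "ME_TRANSPORTE_" l)] := by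
  induction l generalizing a b c with
  | nil => simp [pvGroup]
  | cons ne l ih =>
    obtain ⟨s, e⟩ := ne
    simp only [List.foldl_cons]
    by_cases h1 : PySem.Str.startswith s "ME_BASES_" = true
    · have h2 := pv_excl (p := "ME_BASES_") (q := "ME_SPINNERS_") s (by decide) h1
      have h3 := pv_excl (p := "ME_BASES_") (q := "ME_TRANSPORTE_") s (by decide) h1
      rw [PySem.Str.startswith_eq, PySem.Chars.startswith_iff] at h1
      obtain ⟨t, ht⟩ := h1
      have hs : s.toList = 'M' :: 'E' :: '_' :: (['B','A','S','E','S'] ++ '_' :: t) := by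
        rw [← ht]; rfl
      obtain ⟨hsw, hfind, hsl1, hsl2⟩ := pv_parse s ['B','A','S','E','S'] t (by decide) hs
      norm_num at hfind hsl1 hsl2
      have hfindc : PySem.Chars.findFrom s.toList ['_'] 3 = 8 := hfind
      have hswc : PySem.Chars.startswith s.toList ['M','E','_'] = true := by
        rw [PySem.Str.startswith_eq, show ("ME_" : String).toList = ['M','E','_'] from by decide] at hsw
        exact hsw
      have hstep : pvStepB (PySem.Dict.mk [("ME_BASES_", a), ("ME_SPINNERS_", b), ("ME_TRANSPORTE_", c)]) (s, e)
          = PySem.Dict.mk [("ME_BASES_", a ++ [(String.ofList t, e)]), ("ME_SPINNERS_", b), ("ME_TRANSPORTE_", c)] := by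
        unfold pvStepB
        norm_num [hswc, hfindc, hsl1, hsl2, PySem.Dict.get?, PySem.Dict.insert, PySem.Dict.contains,
          PySem.Dict.items,
        show ("ME_" : String).toList = ['M','E','_'] from by decide,
        show ("_" : String).toList = ['_'] from by decide,
          show String.ofList ['M','E','_','B','A','S','E','S','_'] = "ME_BASES_" from by decide,
            show ("ME_SPINNERS_" : String) ≠ "ME_BASES_" from by decide,
            show ("ME_TRANSPORTE_" : String) ≠ "ME_BASES_" from by decide
          ]
      have h1c : PySem.Chars.startswith s.toList ['M','E','_','B','A','S','E','S','_'] = true := by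
        rw [PySem.Chars.startswith_iff]; exact ⟨t, ht⟩
      have h2c : PySem.Chars.startswith s.toList ['M','E','_','S','P','I','N','N','E','R','S','_'] = false := by
        rw [PySem.Str.startswith_eq] at h2; exact h2
      have h3c : PySem.Chars.startswith s.toList ['M','E','_','T','R','A','N','S','P','O','R','T','E','_'] = false := by
        rw [PySem.Str.startswith_eq] at h3; exact h3
      rw [hstep, ih]
      simp [pvGroup, h1c, h2c, h3c, hsl2]
    · by_cases h2 : PySem.Str.startswith s "ME_SPINNERS_" = true
      · have h3 := pv_excl (p := "ME_SPINNERS_") (q := "ME_TRANSPORTE_") s (by decide) h2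
        rw [Bool.not_eq_true] at h1
        rw [PySem.Str.startswith_eq, PySem.Chars.startswith_iff] at h2
        obtain ⟨t, ht⟩ := h2
        have hs : s.toList = 'M' :: 'E' :: '_' :: (['S','P','I','N','N','E','R','S'] ++ '_' :: t) := by
          rw [← ht]; rfl
        obtain ⟨hsw, hfind, hsl1, hsl2⟩ := pv_parse s ['S','P','I','N','N','E','R','S'] t (by decide) hs
        norm_num at hfind hsl1 hsl2
        have hfindc : PySem.Chars.findFrom s.toList ['_'] 3 = 11 := hfind
        have hswc : PySem.Chars.startswith s.toList ['M','E','_'] = true := by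
          rw [PySem.Str.startswith_eq, show ("ME_" : String).toList = ['M','E','_'] from by decide] at hsw
          exact hsw
        have hstep : pvStepB (PySem.Dict.mk [("ME_BASES_", a), ("ME_SPINNERS_", b), ("ME_TRANSPORTE_", c)]) (s, e)
            = PySem.Dict.mk [("ME_BASES_", a), ("ME_SPINNERS_", b ++ [(String.ofList t, e)]), ("ME_TRANSPORTE_", c)] := by
          unfold pvStepB
          norm_num [hswc, hfindc, hsl1, hsl2, PySem.Dict.get?, PySem.Dict.insert, PySem.Dict.contains,
            PySem.Dict.items,
        show ("ME_" : String).toList = ['M','E','_'] from by decide,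
        show ("_" : String).toList = ['_'] from by decide,
            show String.ofList ['M','E','_','S','P','I','N','N','E','R','S','_'] = "ME_SPINNERS_" from by decide,
              show ("ME_BASES_" : String) ≠ "ME_SPINNERS_" from by decide,
              show ("ME_TRANSPORTE_" : String) ≠ "ME_SPINNERS_" from by decide
            ]
        have h2c : PySem.Chars.startswith s.toList ['M','E','_','S','P','I','N','N','E','R','S','_'] = true := by
          rw [PySem.Chars.startswith_iff]; exact ⟨t, ht⟩
        have h1c : PySem.Chars.startswith s.toList ['M','E','_','B','A','S','E','S','_'] = false := by
          rw [PySem.Str.startswith_eq] at h1; exact h1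
        have h3c : PySem.Chars.startswith s.toList ['M','E','_','T','R','A','N','S','P','O','R','T','E','_'] = false := by
          rw [PySem.Str.startswith_eq] at h3; exact h3
        rw [hstep, ih]
        simp [pvGroup, h1c, h2c, h3c, hsl2]
      · by_cases h3 : PySem.Str.startswith s "ME_TRANSPORTE_" = true
        · rw [Bool.not_eq_true] at h1 h2
          rw [PySem.Str.startswith_eq, PySem.Chars.startswith_iff] at h3
          obtain ⟨t, ht⟩ := h3
          have hs : s.toList = 'M' :: 'E' :: '_' :: (['T','R','A','N','S','P','O','R','T','E'] ++ '_' :: t) := by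
            rw [← ht]; rfl
          obtain ⟨hsw, hfind, hsl1, hsl2⟩ := pv_parse s ['T','R','A','N','S','P','O','R','T','E'] t (by decide) hs
          norm_num at hfind hsl1 hsl2
          have hfindc : PySem.Chars.findFrom s.toList ['_'] 3 = 13 := hfind
          have hswc : PySem.Chars.startswith s.toList ['M','E','_'] = true := by
            rw [PySem.Str.startswith_eq, show ("ME_" : String).toList = ['M','E','_'] from by decide] at hsw
            exact hsw
          have hstep : pvStepB (PySem.Dict.mk [("ME_BASES_", a), ("ME_SPINNERS_", b), ("ME_TRANSPORTE_", c)]) (s, e)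
              = PySem.Dict.mk [("ME_BASES_", a), ("ME_SPINNERS_", b), ("ME_TRANSPORTE_", c ++ [(String.ofList t, e)])] := by
            unfold pvStepB
            norm_num [hswc, hfindc, hsl1, hsl2, PySem.Dict.get?, PySem.Dict.insert, PySem.Dict.contains,
              PySem.Dict.items,
        show ("ME_" : String).toList = ['M','E','_'] from by decide,
        show ("_" : String).toList = ['_'] from by decide,
              show String.ofList ['M','E','_','T','R','A','N','S','P','O','R','T','E','_'] = "ME_TRANSPORTE_" from by decide,
                show ("ME_BASES_" : String) ≠ "ME_TRANSPORTE_" from by decide,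
                show ("ME_SPINNERS_" : String) ≠ "ME_TRANSPORTE_" from by decide
              ]
          have h3c : PySem.Chars.startswith s.toList ['M','E','_','T','R','A','N','S','P','O','R','T','E','_'] = true := by
            rw [PySem.Chars.startswith_iff]; exact ⟨t, ht⟩
          have h1c : PySem.Chars.startswith s.toList ['M','E','_','B','A','S','E','S','_'] = false := by
            rw [PySem.Str.startswith_eq] at h1; exact h1
          have h2c : PySem.Chars.startswith s.toList ['M','E','_','S','P','I','N','N','E','R','S','_'] = false := by
            rw [PySem.Str.startswith_eq] at h2; exact h2
          rw [hstep, ih]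
          simp [pvGroup, h1c, h2c, h3c, hsl2]
        · simp only [Bool.not_eq_true] at h1 h2 h3
          rw [pv_stepB_none s e _ (by rfl) h1 h2 h3, ih]
          have h1c : PySem.Chars.startswith s.toList ['M','E','_','B','A','S','E','S','_'] = false := by
            rw [PySem.Str.startswith_eq] at h1; exact h1
          have h2c : PySem.Chars.startswith s.toList ['M','E','_','S','P','I','N','N','E','R','S','_'] = false := by
            rw [PySem.Str.startswith_eq] at h2; exact h2
          have h3c : PySem.Chars.startswith s.toList ['M','E','_','T','R','A','N','S','P','O','R','T','E','_'] = false := by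
            rw [PySem.Str.startswith_eq] at h3; exact h3
          simp [pvGroup, h1c, h2c, h3c]

-- ===== VERDICT (by name: the statement is the Claim_ definition above) =====
theorem agrupar_por_modulo_spec : Claim_equal_agrupar_por_modulo := by
  intro direcciones estados _
  unfold Spec_agrupar_por_modulo agrupar_por_modulo agrupar_por_modulo_alt
  have h0 : PySem.Dict.ofList
      ([("ME_BASES_", ([] : List (String × Bool))), ("ME_SPINNERS_", []), ("ME_TRANSPORTE_", [])])
      = PySem.Dict.mk [("ME_BASES_", []), ("ME_SPINNERS_", []), ("ME_TRANSPORTE_", [])] := by decide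
  rw [h0, pv_inv, pv_inv_alt]
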